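-- pv_equiv track=rewrite | github.com/1006caomiao/Privacy-Protect-Prompt-Obfuscation | dataset_formatter/Pupa_ner_formatter.py | compute_deleted_spans
-- ===== SOURCE A (Python) =====
-- import difflib
-- from typing import Iterable, Iterator, List, Optional, Sequence, Tuple
--
-- PII_TOKEN = "[REDACTED]"
--
-- def compute_deleted_spans(original: str, masked: str) -> List[Tuple[int, int]]:
--     """Return spans in `original` that were removed to form `masked` (with [REDACTED] stripped)."""
--     anchor = masked.replace(PII_TOKEN, "")
--     matcher = difflib.SequenceMatcher(a=original, b=anchor, autojunk=False)
--     spans: List[Tuple[int, int]] = []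
--     for tag, a0, a1, _b0, _b1 in matcher.get_opcodes():
--         if tag in ("delete", "replace") and a1 > a0:
--             spans.append((a0, a1))
--     return spans
-- ===== SOURCE B (Python) =====
-- from typing import List, Tuple
--
-- PII_TOKEN = "[REDACTED]"
--
-- def _suffix_len(a: str, b: str, i: int, j: int, alo: int, blo: int) -> int:
--     """Length of the longest common suffix of a[alo:i+1] and b[blo:j+1]."""
--     k = 0
--     while i - k >= alo and j - k >= blo and a[i - k] == b[j - k]:
--         k += 1
--     return k
--
-- def _longest_match(a: str, b: str, alo: int, ahi: int, blo: int, bhi: int):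
--     """Leftmost (in a, then in b) longest matching block of a[alo:ahi] vs b[blo:bhi]."""
--     besti, bestj, bestsize = alo, blo, 0
--     for i in range(alo, ahi):
--         for j in range(blo, bhi):
--             if a[i] != b[j]:
--                 continue
--             k = _suffix_len(a, b, i, j, alo, blo)
--             if k > bestsize:
--                 besti, bestj, bestsize = i - k + 1, j - k + 1, k
--     return besti, bestj, bestsize
--
-- def _gaps(a: str, b: str, alo: int, ahi: int, blo: int, bhi: int,
--           out: List[Tuple[int, int]]) -> None:
--     """Append, in order, the maximal unmatched spans of a[alo:ahi]."""
--     i, j, k = _longest_match(a, b, alo, ahi, blo, bhi)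
--     if k == 0:
--         if ahi > alo:
--             out.append((alo, ahi))
--         return
--     _gaps(a, b, alo, i, blo, j, out)
--     _gaps(a, b, i + k, ahi, j + k, bhi, out)
--
-- def compute_deleted_spans(original: str, masked: str) -> List[Tuple[int, int]]:
--     """Return spans in `original` that were removed to form `masked` (with [REDACTED] stripped)."""
--     anchor = masked.replace(PII_TOKEN, "")
--     spans: List[Tuple[int, int]] = []
--     _gaps(original, anchor, 0, len(original), 0, len(anchor), spans)
--     return spans
-- ===== Notes on version B (the rewrite author's own statement) =====
-- stated objective: alternative
-- what changed: B replaces the difflib pipeline (j2len chain DP matcher, block merging, opcode construction, delete/replace tag filter) by a divide-and-conquer that emits each unmatched a-span directly, finding the leftmost-longest matching block by a naive per-end-pair common-suffix scan with no DP dictionary, no block list, no merge pass and no opcodes.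
import Mathlib
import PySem

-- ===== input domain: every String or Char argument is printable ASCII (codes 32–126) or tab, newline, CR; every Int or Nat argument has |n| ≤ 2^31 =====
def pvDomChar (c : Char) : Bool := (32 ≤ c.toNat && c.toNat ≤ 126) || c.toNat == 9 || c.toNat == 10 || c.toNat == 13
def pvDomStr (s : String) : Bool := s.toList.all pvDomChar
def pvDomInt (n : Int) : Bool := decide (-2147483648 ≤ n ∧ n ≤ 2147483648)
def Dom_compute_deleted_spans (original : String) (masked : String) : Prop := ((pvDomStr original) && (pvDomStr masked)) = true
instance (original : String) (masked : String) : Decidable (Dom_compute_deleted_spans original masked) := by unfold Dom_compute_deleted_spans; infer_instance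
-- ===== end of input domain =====

-- B finds the unmatched spans by divide and conquer — a naive leftmost-longest block search
-- (per end-pair common-suffix lengths by direct comparison) emitting each a-gap in place —
-- instead of A's difflib pipeline (j2len DP matcher, block merge, opcodes, tag filter);
-- objective: alternative (same output, different algorithm; no speed claim).

-- ===== PORT A =====
-- step-for-step port of difflib.SequenceMatcher (autojunk=False, no junk), which A calls.

-- find_longest_match inner chain computation (j2len as a function, reset per row, exactly difflib's recurrence)
def pvFlmRow (a b : List Char) (blo bhi : Nat) (i : Nat)
    (st : (Nat → Nat) × (Nat × Nat × Nat)) : (Nat → Nat) × (Nat × Nat × Nat) :=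
  let j2len := st.1
  let js := (List.range b.length).filter
    (fun j => decide (blo ≤ j) && decide (j < bhi) && (b.getD j ' ' == a.getD i ' '))
  js.foldl
    (fun st2 j =>
      let k := (if j = 0 then 0 else j2len (j - 1)) + 1
      let new := fun x => if x = j then k else st2.1 x
      let best := if k > st2.2.2.2 then (i + 1 - k, j + 1 - k, k) else st2.2
      (new, best))
    ((fun _ => 0), st.2)

-- while besti > alo and bestj > blo and a[besti-1] == b[bestj-1] (fuel-guarded while loop)
def pvExtendBack (a b : List Char) (alo blo : Nat) : Nat → Nat × Nat × Nat → Nat × Nat × Nat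
  | 0, st => st
  | fuel + 1, (bi, bj, sz) =>
    if alo < bi ∧ blo < bj ∧ a.getD (bi - 1) ' ' = b.getD (bj - 1) ' ' then
      pvExtendBack a b alo blo fuel (bi - 1, bj - 1, sz + 1)
    else (bi, bj, sz)

-- while besti+bestsize < ahi and bestj+bestsize < bhi and a[besti+size] == b[bestj+size]
def pvExtendFwd (a b : List Char) (ahi bhi : Nat) : Nat → Nat × Nat × Nat → Nat × Nat × Nat
  | 0, st => st
  | fuel + 1, (bi, bj, sz) =>
    if bi + sz < ahi ∧ bj + sz < bhi ∧ a.getD (bi + sz) ' ' = b.getD (bj + sz) ' ' then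
      pvExtendFwd a b ahi bhi fuel (bi, bj, sz + 1)
    else (bi, bj, sz)

-- difflib find_longest_match (no junk: the junk-extension loops are no-ops and are omitted)
def pvFindLongestMatch (a b : List Char) (alo ahi blo bhi : Nat) : Nat × Nat × Nat :=
  let r := (List.range' alo (ahi - alo)).foldl
    (fun st i => ((pvFlmRow a b blo bhi i st).1, (pvFlmRow a b blo bhi i st).2))
    ((fun _ => 0), (alo, blo, 0))
  let st1 := pvExtendBack a b alo blo r.2.1 r.2
  pvExtendFwd a b ahi bhi ahi st1

-- recursive split of get_matching_blocks (difflib collects via a stack then sorts;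
-- in-order recursion yields the same sorted list; fuel bounds the natural depth ahi - alo)
def pvMBlocks (a b : List Char) : Nat → Nat → Nat → Nat → Nat → List (Nat × Nat × Nat)
  | 0, _, _, _, _ => []
  | fuel + 1, alo, ahi, blo, bhi =>
    let m := pvFindLongestMatch a b alo ahi blo bhi
    if m.2.2 = 0 then []
    else pvMBlocks a b fuel alo m.1 blo m.2.1 ++
         m :: pvMBlocks a b fuel (m.1 + m.2.2) ahi (m.2.1 + m.2.2) bhi

-- merge adjacent blocks and append the (la, lb, 0) sentinel, as in get_matching_blocks
def pvGetMatchingBlocks (a b : List Char) : List (Nat × Nat × Nat) :=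
  let raw := pvMBlocks a b (a.length + 1) 0 a.length 0 b.length
  let st := raw.foldl
    (fun (st : Nat × Nat × Nat × List (Nat × Nat × Nat)) bl =>
      if st.1 + st.2.2.1 = bl.1 ∧ st.2.1 + st.2.2.1 = bl.2.1 then
        (st.1, st.2.1, st.2.2.1 + bl.2.2, st.2.2.2)
      else
        (bl.1, bl.2.1, bl.2.2,
          if st.2.2.1 ≠ 0 then st.2.2.2 ++ [(st.1, st.2.1, st.2.2.1)] else st.2.2.2))
    (0, 0, 0, [])
  (if st.2.2.1 ≠ 0 then st.2.2.2 ++ [(st.1, st.2.1, st.2.2.1)] else st.2.2.2) ++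
    [(a.length, b.length, 0)]

-- get_opcodes loop over the matching blocks, exactly as difflib derives opcodes
def pvOpStep (st : Nat × Nat × List (String × Nat × Nat × Nat × Nat)) (bl : Nat × Nat × Nat) :
    Nat × Nat × List (String × Nat × Nat × Nat × Nat) :=
  let i := st.1; let j := st.2.1; let ans := st.2.2
  let ai := bl.1; let bj := bl.2.1; let sz := bl.2.2
  let tag : String :=
    if i < ai ∧ j < bj then "replace"
    else if i < ai then "delete"
    else if j < bj then "insert"
    else ""
  let ans := if tag ≠ "" then ans ++ [(tag, i, ai, j, bj)] else ans
  let ans := if sz ≠ 0 then ans ++ [("equal", ai, ai + sz, bj, bj + sz)] else ans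
  (ai + sz, bj + sz, ans)

def pvOpFold (blocks : List (Nat × Nat × Nat)) (st : Nat × Nat × List (String × Nat × Nat × Nat × Nat)) :
    Nat × Nat × List (String × Nat × Nat × Nat × Nat) :=
  blocks.foldl pvOpStep st

-- for tag, a0, a1, _, _ in opcodes: if tag in ("delete","replace") and a1 > a0: spans.append((a0,a1))
def pvSpanFold (init : List (Int × Int)) (ops : List (String × Nat × Nat × Nat × Nat)) :
    List (Int × Int) :=
  ops.foldl
    (fun spans op =>
      if (op.1 = "delete" ∨ op.1 = "replace") ∧ op.2.2.1 > op.2.1 then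
        spans ++ [((op.2.1 : Int), (op.2.2.1 : Int))]
      else spans)
    init

def compute_deleted_spans (original : String) (masked : String) : List (Int × Int) :=
  let anchor := PySem.Str.replace masked "[REDACTED]" ""
  let blocks := pvGetMatchingBlocks original.toList anchor.toList
  pvSpanFold [] (pvOpFold blocks (0, 0, [])).2.2

-- ===== PORT B =====
-- _suffix_len's while loop: k advances while i-k ≥ alo, j-k ≥ blo and a[i-k] == b[j-k]
-- (fuel i+1 bounds the iteration count; the loop stops by itself within that)
def pvSufGo (a b : List Char) (i j alo blo : Nat) : Nat → Nat → Nat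
  | 0, k => k
  | fuel + 1, k =>
    if alo + k ≤ i ∧ blo + k ≤ j ∧ a.getD (i - k) ' ' = b.getD (j - k) ' ' then
      pvSufGo a b i j alo blo fuel (k + 1)
    else k

def pvSuffixLen (a b : List Char) (i j alo blo : Nat) : Nat :=
  pvSufGo a b i j alo blo (i + 1) 0

-- _longest_match: for i, for j: skip on mismatch, else k = suffix length, keep if k > bestsize
def pvLongestMatchB (a b : List Char) (alo ahi blo bhi : Nat) : Nat × Nat × Nat :=
  (List.range' alo (ahi - alo)).foldl
    (fun best i =>
      (List.range' blo (bhi - blo)).foldl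
        (fun (best : Nat × Nat × Nat) j =>
          if a.getD i ' ' ≠ b.getD j ' ' then best
          else
            let k := pvSuffixLen a b i j alo blo
            if k > best.2.2 then (i + 1 - k, j + 1 - k, k) else best)
        best)
    (alo, blo, 0)

-- _gaps: recursive divide and conquer appending unmatched a-spans to out in order
def pvGapsB (a b : List Char) :
    Nat → Nat → Nat → Nat → Nat → List (Int × Int) → List (Int × Int)
  | 0, _, _, _, _, out => out
  | fuel + 1, alo, ahi, blo, bhi, out =>
    let m := pvLongestMatchB a b alo ahi blo bhi
    if m.2.2 = 0 then
      if alo < ahi then out ++ [((alo : Int), (ahi : Int))] else out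
    else
      pvGapsB a b fuel (m.1 + m.2.2) ahi (m.2.1 + m.2.2) bhi
        (pvGapsB a b fuel alo m.1 blo m.2.1 out)

def compute_deleted_spans_alt (original : String) (masked : String) : List (Int × Int) :=
  let anchor := PySem.Str.replace masked "[REDACTED]" ""
  pvGapsB original.toList anchor.toList (original.toList.length + 1)
    0 original.toList.length 0 anchor.toList.length []

-- ===== PRECONDITION & SPEC =====
def Spec_compute_deleted_spans (original : String) (masked : String) (out : List (Int × Int)) : Prop := out = compute_deleted_spans_alt original masked
instance (original : String) (masked : String) (out : List (Int × Int)) : Decidable (Spec_compute_deleted_spans original masked out) := by unfold Spec_compute_deleted_spans; infer_instance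

-- ===== CLAIM (what is proved, stated in full; the proofs are below) =====
def Claim_equal_compute_deleted_spans : Prop := ∀ (original : String) (masked : String), Dom_compute_deleted_spans original masked → Spec_compute_deleted_spans original masked (compute_deleted_spans original masked)

-- ===== LEMMAS AND PROOFS =====

-- ---- suffix-length (chain) facts ----

lemma pvSufGo_shift (a b : List Char) (i j alo blo : Nat) (hi : 1 ≤ i) (hj : 1 ≤ j) :
    ∀ fuel k, pvSufGo a b i j alo blo fuel (k + 1) =
      pvSufGo a b (i - 1) (j - 1) alo blo fuel k + 1 := by
  intro fuel
  induction fuel with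
  | zero => intro k; simp [pvSufGo]
  | succ n ih =>
    intro k
    simp only [pvSufGo]
    have e1 : i - (k + 1) = i - 1 - k := by omega
    have e2 : j - (k + 1) = j - 1 - k := by omega
    by_cases hc : alo + k ≤ i - 1 ∧ blo + k ≤ j - 1 ∧ a.getD (i - 1 - k) ' ' = b.getD (j - 1 - k) ' '
    · have hc' : alo + (k + 1) ≤ i ∧ blo + (k + 1) ≤ j ∧
          a.getD (i - (k + 1)) ' ' = b.getD (j - (k + 1)) ' ' := by
        rw [e1, e2]; exact ⟨by omega, by omega, hc.2.2⟩
      rw [if_pos hc', if_pos hc]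
      exact ih (k + 1)
    · have hc' : ¬ (alo + (k + 1) ≤ i ∧ blo + (k + 1) ≤ j ∧
          a.getD (i - (k + 1)) ' ' = b.getD (j - (k + 1)) ' ') := by
        rw [e1, e2]; intro h; exact hc ⟨by omega, by omega, h.2.2⟩
      rw [if_neg hc', if_neg hc]

lemma pvSuffixLen_eq_zero (a b : List Char) (i j alo blo : Nat)
    (h : ¬ (alo ≤ i ∧ blo ≤ j ∧ a.getD i ' ' = b.getD j ' ')) :
    pvSuffixLen a b i j alo blo = 0 := by
  unfold pvSuffixLen
  simp only [pvSufGo]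
  rw [if_neg]
  simpa using h

lemma pvSuffixLen_succ (a b : List Char) (i j alo blo : Nat)
    (h : alo ≤ i ∧ blo ≤ j ∧ a.getD i ' ' = b.getD j ' ') :
    pvSuffixLen a b i j alo blo =
      (if alo + 1 ≤ i ∧ blo + 1 ≤ j then pvSuffixLen a b (i - 1) (j - 1) alo blo else 0) + 1 := by
  unfold pvSuffixLen
  conv_lhs => simp only [pvSufGo]
  rw [if_pos (by simpa using h)]
  by_cases hij : alo + 1 ≤ i ∧ blo + 1 ≤ j
  · rw [if_pos hij]
    rw [pvSufGo_shift a b i j alo blo (by omega) (by omega) i 0]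
    have : i - 1 + 1 = i := by omega
    rw [this]
  · rw [if_neg hij]
    rcases i with _ | i0
    · simp [pvSufGo]
    · simp only [pvSufGo]
      rw [if_neg]
      intro hcn
      exact hij ⟨hcn.1, hcn.2.1⟩

-- the loop stops because its condition fails at the returned k (fuel is sufficient)
lemma pvSufGo_stop (a b : List Char) (i j alo blo : Nat) :
    ∀ fuel k, i + 1 ≤ alo + k + fuel →
      ¬ (alo + pvSufGo a b i j alo blo fuel k ≤ i ∧
         blo + pvSufGo a b i j alo blo fuel k ≤ j ∧
         a.getD (i - pvSufGo a b i j alo blo fuel k) ' ' =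
           b.getD (j - pvSufGo a b i j alo blo fuel k) ' ') := by
  intro fuel
  induction fuel with
  | zero => intro k hk; simp only [pvSufGo]; omega
  | succ n ih =>
    intro k hk
    simp only [pvSufGo]
    by_cases hc : alo + k ≤ i ∧ blo + k ≤ j ∧ a.getD (i - k) ' ' = b.getD (j - k) ' '
    · rw [if_pos hc]; exact ih (k + 1) (by omega)
    · rw [if_neg hc]; exact hc

lemma pvSuffixLen_stop (a b : List Char) (i j alo blo : Nat) :
    ¬ (alo + pvSuffixLen a b i j alo blo ≤ i ∧
       blo + pvSuffixLen a b i j alo blo ≤ j ∧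
       a.getD (i - pvSuffixLen a b i j alo blo) ' ' =
         b.getD (j - pvSuffixLen a b i j alo blo) ' ') := by
  exact pvSufGo_stop a b i j alo blo (i + 1) 0 (by omega)

lemma pvSufGo_bound (a b : List Char) (i j alo blo : Nat) :
    ∀ fuel k, alo + k ≤ i + 1 → blo + k ≤ j + 1 →
      alo + pvSufGo a b i j alo blo fuel k ≤ i + 1 ∧
      blo + pvSufGo a b i j alo blo fuel k ≤ j + 1 := by
  intro fuel
  induction fuel with
  | zero => intro k h1 h2; simp only [pvSufGo]; omega
  | succ n ih =>
    intro k h1 h2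
    simp only [pvSufGo]
    by_cases hc : alo + k ≤ i ∧ blo + k ≤ j ∧ a.getD (i - k) ' ' = b.getD (j - k) ' '
    · rw [if_pos hc]; exact ih (k + 1) (by omega) (by omega)
    · rw [if_neg hc]; omega

lemma pvSuffixLen_bound (a b : List Char) (i j alo blo : Nat)
    (hi : alo ≤ i + 1) (hj : blo ≤ j + 1) :
    alo + pvSuffixLen a b i j alo blo ≤ i + 1 ∧ blo + pvSuffixLen a b i j alo blo ≤ j + 1 := by
  exact pvSufGo_bound a b i j alo blo (i + 1) 0 (by omega) (by omega)


-- ---- A's j2len DP row equals B's direct suffix-length row ----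

-- the chain values of one row, as a function (zero off the window / on mismatch)
def pvRowFn (a b : List Char) (alo blo bhi : Nat) (i : Nat) : Nat → Nat :=
  fun x => if blo ≤ x ∧ x < bhi ∧ b.getD x ' ' = a.getD i ' ' then pvSuffixLen a b i x alo blo else 0

-- B's inner (per-row) fold, named for the proofs
def pvBRow (a b : List Char) (alo blo bhi : Nat) (i : Nat) (best : Nat × Nat × Nat) : Nat × Nat × Nat :=
  (List.range' blo (bhi - blo)).foldl
    (fun (best : Nat × Nat × Nat) j =>
      if a.getD i ' ' ≠ b.getD j ' ' then best
      else
        let k := pvSuffixLen a b i j alo blo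
        if k > best.2.2 then (i + 1 - k, j + 1 - k, k) else best)
    best

lemma pvLongestMatchB_eq_rows (a b : List Char) (alo ahi blo bhi : Nat) :
    pvLongestMatchB a b alo ahi blo bhi =
      (List.range' alo (ahi - alo)).foldl (fun best i => pvBRow a b alo blo bhi i best)
        (alo, blo, 0) := rfl

-- the invariant carried between rows: f is the previous row's chain function
def pvFInv (a b : List Char) (alo blo bhi : Nat) (i : Nat) (f : Nat → Nat) : Prop :=
  (i = alo ∧ f = fun _ => 0) ∨ (alo + 1 ≤ i ∧ f = pvRowFn a b alo blo bhi (i - 1))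

-- the k computed by A's inner loop from the previous row equals the direct suffix length
lemma pvK_eq_sfx (a b : List Char) (alo blo bhi : Nat) (i j : Nat) (f : Nat → Nat)
    (hfi : pvFInv a b alo blo bhi i f) (hj : blo ≤ j ∧ j < bhi ∧ b.getD j ' ' = a.getD i ' ')
    (hai : alo ≤ i) :
    (if j = 0 then 0 else f (j - 1)) + 1 = pvSuffixLen a b i j alo blo := by
  rw [pvSuffixLen_succ a b i j alo blo ⟨hai, hj.1, hj.2.2.symm⟩]
  rcases hfi with ⟨hia, hf⟩ | ⟨hia, hf⟩
  · subst hf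
    rw [if_neg (show ¬ (alo + 1 ≤ i ∧ blo + 1 ≤ j) by omega)]
    split <;> rfl
  · subst hf
    rcases Nat.eq_zero_or_pos j with hj0 | hj1
    · subst hj0
      rw [if_pos rfl, if_neg (show ¬ (alo + 1 ≤ i ∧ blo + 1 ≤ 0) by omega)]
    · rw [if_neg (show ¬ j = 0 by omega)]
      unfold pvRowFn
      by_cases hb : blo + 1 ≤ j
      · rw [if_pos (show alo + 1 ≤ i ∧ blo + 1 ≤ j from ⟨hia, hb⟩)]
        by_cases hch : b.getD (j - 1) ' ' = a.getD (i - 1) ' '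
        · rw [if_pos (show blo ≤ j - 1 ∧ j - 1 < bhi ∧
            b.getD (j - 1) ' ' = a.getD (i - 1) ' ' from ⟨by omega, by omega, hch⟩)]
        · rw [if_neg (show ¬ (blo ≤ j - 1 ∧ j - 1 < bhi ∧
              b.getD (j - 1) ' ' = a.getD (i - 1) ' ') from fun hc => hch hc.2.2),
            pvSuffixLen_eq_zero a b (i - 1) (j - 1) alo blo (fun hc => hch hc.2.2.symm)]
      · rw [if_neg (show ¬ (alo + 1 ≤ i ∧ blo + 1 ≤ j) from fun hc => hb hc.2),
          if_neg (show ¬ (blo ≤ j - 1 ∧ j - 1 < bhi ∧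
            b.getD (j - 1) ' ' = a.getD (i - 1) ' ') from fun hc => hb (by omega))]

-- A's inner fold leaves behind exactly the chain function of the current row
lemma pvRow_fold_fst (a b : List Char) (i : Nat) (f : Nat → Nat)
    (vj : Nat → Nat) :
    ∀ (l : List Nat) (g : Nat → Nat) (best : Nat × Nat × Nat),
      (l.foldl
        (fun st2 j =>
          let k := vj j
          let new := fun x => if x = j then k else st2.1 x
          let best := if k > st2.2.2.2 then (i + 1 - k, j + 1 - k, k) else st2.2
          (new, best))
        (g, best)).1 = fun x => if x ∈ l then vj x else g x := by
  intro l
  induction l with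
  | nil => intro g best; funext x; simp
  | cons j t ih =>
    intro g best
    rw [List.foldl_cons, ih]
    funext x
    by_cases hx : x ∈ t
    · simp [hx]
    · by_cases hxj : x = j <;> simp [hx, hxj]

-- A's inner fold updates best exactly like an update-if-greater scan of the scores
lemma pvRow_fold_snd (a b : List Char) (i : Nat) (vj : Nat → Nat) :
    ∀ (l : List Nat) (g : Nat → Nat) (best : Nat × Nat × Nat),
      (l.foldl
        (fun st2 j =>
          let k := vj j
          let new := fun x => if x = j then k else st2.1 x
          let best := if k > st2.2.2.2 then (i + 1 - k, j + 1 - k, k) else st2.2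
          (new, best))
        (g, best)).2 =
      l.foldl
        (fun (best : Nat × Nat × Nat) j =>
          if vj j > best.2.2 then (i + 1 - vj j, j + 1 - vj j, vj j) else best)
        best := by
  intro l
  induction l with
  | nil => intro g best; rfl
  | cons j t ih => intro g best; rw [List.foldl_cons, List.foldl_cons, ih]

-- A's filtered j-list is the in-window chars-equal filter
lemma pvJs_eq (a b : List Char) (blo bhi : Nat) (i : Nat) (hb : bhi ≤ b.length)
    (hbb : blo ≤ bhi) :
    (List.range b.length).filter
        (fun j => decide (blo ≤ j) && decide (j < bhi) && (b.getD j ' ' == a.getD i ' ')) =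
      (List.range' blo (bhi - blo)).filter (fun j => b.getD j ' ' == a.getD i ' ') := by
  rw [List.range_eq_range']
  have h1 : b.length = blo + ((bhi - blo) + (b.length - bhi)) := by omega
  rw [h1, ← List.range'_append_1, ← List.range'_append_1, List.filter_append, List.filter_append]
  have e1 : (List.range' 0 blo).filter
      (fun j => decide (blo ≤ j) && decide (j < bhi) && (b.getD j ' ' == a.getD i ' ')) = [] := by
    rw [List.filter_eq_nil_iff]
    intro x hx
    rw [List.mem_range'] at hx
    obtain ⟨y, hy, rfl⟩ := hx
    simp only [Bool.and_eq_true, decide_eq_true_eq]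
    intro hc
    omega
  have e3 : (List.range' (0 + blo + (bhi - blo)) (b.length - bhi)).filter
      (fun j => decide (blo ≤ j) && decide (j < bhi) && (b.getD j ' ' == a.getD i ' ')) = [] := by
    rw [List.filter_eq_nil_iff]
    intro x hx
    rw [List.mem_range'] at hx
    obtain ⟨y, hy, rfl⟩ := hx
    simp only [Bool.and_eq_true, decide_eq_true_eq]
    intro hc
    omega
  have e2 : (List.range' (0 + blo) (bhi - blo)).filter
      (fun j => decide (blo ≤ j) && decide (j < bhi) && (b.getD j ' ' == a.getD i ' ')) =
      (List.range' blo (bhi - blo)).filter (fun j => b.getD j ' ' == a.getD i ' ') := by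
    rw [Nat.zero_add]
    apply List.filter_congr
    intro x hx
    rw [List.mem_range'] at hx
    obtain ⟨y, hy, rfl⟩ := hx
    simp
    intro _
    omega
  rw [e1, e2, e3]
  simp


lemma pvFlmRow_fst (a b : List Char) (blo bhi i : Nat) (f : Nat → Nat) (best : Nat × Nat × Nat) :
    (pvFlmRow a b blo bhi i (f, best)).1 =
      fun x => if x ∈ (List.range b.length).filter
          (fun j => decide (blo ≤ j) && decide (j < bhi) && (b.getD j ' ' == a.getD i ' ')) then
        (if x = 0 then 0 else f (x - 1)) + 1 else (fun _ => 0) x := by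
  exact pvRow_fold_fst a b i f (fun j => (if j = 0 then 0 else f (j - 1)) + 1) _ (fun _ => 0) best

lemma pvFlmRow_fst' (a b : List Char) (alo blo bhi i : Nat) (f : Nat → Nat)
    (best : Nat × Nat × Nat) (hb : bhi ≤ b.length) (hai : alo ≤ i)
    (hfi : pvFInv a b alo blo bhi i f) :
    (pvFlmRow a b blo bhi i (f, best)).1 = pvRowFn a b alo blo bhi i := by
  rw [pvFlmRow_fst]
  funext x
  by_cases hm : blo ≤ x ∧ x < bhi ∧ b.getD x ' ' = a.getD i ' '
  · have hmem : x ∈ (List.range b.length).filter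
        (fun j => decide (blo ≤ j) && decide (j < bhi) && (b.getD j ' ' == a.getD i ' ')) := by
      rw [List.mem_filter, List.mem_range]
      refine ⟨by omega, ?_⟩
      simp only [Bool.and_eq_true, decide_eq_true_eq, beq_iff_eq]
      exact ⟨⟨hm.1, hm.2.1⟩, hm.2.2⟩
    rw [if_pos hmem, pvK_eq_sfx a b alo blo bhi i x f hfi hm hai]
    unfold pvRowFn
    rw [if_pos hm]
  · have hmem : x ∉ (List.range b.length).filter
        (fun j => decide (blo ≤ j) && decide (j < bhi) && (b.getD j ' ' == a.getD i ' ')) := by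
      rw [List.mem_filter, List.mem_range]
      intro hc
      apply hm
      have := hc.2
      simp only [Bool.and_eq_true, decide_eq_true_eq, beq_iff_eq] at this
      exact ⟨this.1.1, this.1.2, this.2⟩
    rw [if_neg hmem]
    unfold pvRowFn
    rw [if_neg hm]

lemma pvFlmRow_snd' (a b : List Char) (alo blo bhi i : Nat) (f : Nat → Nat)
    (best : Nat × Nat × Nat) (hb : bhi ≤ b.length) (hbb : blo ≤ bhi) (hai : alo ≤ i)
    (hfi : pvFInv a b alo blo bhi i f) :
    (pvFlmRow a b blo bhi i (f, best)).2 = pvBRow a b alo blo bhi i best := by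
  have h0 : (pvFlmRow a b blo bhi i (f, best)).2 =
      ((List.range b.length).filter
        (fun j => decide (blo ≤ j) && decide (j < bhi) && (b.getD j ' ' == a.getD i ' '))).foldl
        (fun (best : Nat × Nat × Nat) j =>
          if (if j = 0 then 0 else f (j - 1)) + 1 > best.2.2 then
            (i + 1 - ((if j = 0 then 0 else f (j - 1)) + 1),
             j + 1 - ((if j = 0 then 0 else f (j - 1)) + 1),
             (if j = 0 then 0 else f (j - 1)) + 1)
          else best)
        best :=
    pvRow_fold_snd a b i (fun j => (if j = 0 then 0 else f (j - 1)) + 1) _ (fun _ => 0) best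
  rw [h0]
  rw [PySem.List.foldl_congr_mem _ _
    (fun (best : Nat × Nat × Nat) j =>
      if pvSuffixLen a b i j alo blo > best.2.2 then
        (i + 1 - pvSuffixLen a b i j alo blo, j + 1 - pvSuffixLen a b i j alo blo,
         pvSuffixLen a b i j alo blo)
      else best)
    best ?_]
  · rw [pvJs_eq a b blo bhi i hb hbb, List.foldl_filter]
    unfold pvBRow
    apply PySem.List.foldl_congr_mem
    intro acc x hx
    by_cases hch : b.getD x ' ' = a.getD i ' '
    · have h1 : (b.getD x ' ' == a.getD i ' ') = true := by simpa using hch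
      have h2 : ¬ (a.getD i ' ' ≠ b.getD x ' ') := fun h => h hch.symm
      rw [if_pos h1, if_neg h2]
    · have h1 : ¬ ((b.getD x ' ' == a.getD i ' ') = true) := by simpa using hch
      have h2 : a.getD i ' ' ≠ b.getD x ' ' := fun h => hch h.symm
      rw [if_neg h1, if_pos h2]
  · intro acc x hx
    rw [List.mem_filter, List.mem_range] at hx
    have hx2 := hx.2
    simp only [Bool.and_eq_true, decide_eq_true_eq, beq_iff_eq] at hx2
    rw [pvK_eq_sfx a b alo blo bhi i x f hfi ⟨hx2.1.1, hx2.1.2, hx2.2⟩ hai]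

lemma pvFlm_fold_eq (a b : List Char) (alo blo bhi : Nat) (hb : bhi ≤ b.length)
    (hbb : blo ≤ bhi) :
    ∀ (n i : Nat) (f : Nat → Nat) (best : Nat × Nat × Nat), alo ≤ i →
      pvFInv a b alo blo bhi i f →
      ((List.range' i n).foldl
          (fun st i2 => ((pvFlmRow a b blo bhi i2 st).1, (pvFlmRow a b blo bhi i2 st).2))
          (f, best)).2 =
        (List.range' i n).foldl (fun best i2 => pvBRow a b alo blo bhi i2 best) best := by
  intro n
  induction n with
  | zero => intro i f best _ _; rfl
  | succ m ih =>
    intro i f best hai hfi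
    rw [List.range'_succ, List.foldl_cons, List.foldl_cons]
    rw [pvFlmRow_fst' a b alo blo bhi i f best hb hai hfi,
      pvFlmRow_snd' a b alo blo bhi i f best hb hbb hai hfi]
    exact ih (i + 1) (pvRowFn a b alo blo bhi i) (pvBRow a b alo blo bhi i best)
      (by omega) (Or.inr ⟨by omega, by simp⟩)


-- ---- B's best is a recorded maximal block; A's extension loops are no-ops on it ----

def pvBStep (a b : List Char) (alo blo i : Nat) (best : Nat × Nat × Nat) (j : Nat) :
    Nat × Nat × Nat :=
  if a.getD i ' ' ≠ b.getD j ' ' then best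
  else if pvSuffixLen a b i j alo blo > best.2.2 then
    (i + 1 - pvSuffixLen a b i j alo blo, j + 1 - pvSuffixLen a b i j alo blo,
      pvSuffixLen a b i j alo blo)
  else best

lemma pvBRow_def (a b : List Char) (alo blo bhi i : Nat) (best : Nat × Nat × Nat) :
    pvBRow a b alo blo bhi i best =
      (List.range' blo (bhi - blo)).foldl (pvBStep a b alo blo i) best := rfl

def pvGoodB (a b : List Char) (alo ahi blo bhi : Nat) (best : Nat × Nat × Nat) : Prop :=
  best = (alo, blo, 0) ∨ ∃ i j, alo ≤ i ∧ i < ahi ∧ blo ≤ j ∧ j < bhi ∧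
    a.getD i ' ' = b.getD j ' ' ∧
    best = (i + 1 - pvSuffixLen a b i j alo blo, j + 1 - pvSuffixLen a b i j alo blo,
      pvSuffixLen a b i j alo blo)

lemma pvBStep_mono (a b : List Char) (alo blo i : Nat) (best : Nat × Nat × Nat) (j : Nat) :
    best.2.2 ≤ (pvBStep a b alo blo i best j).2.2 := by
  unfold pvBStep
  split_ifs with h1 h2
  · exact le_refl _
  · simp only []
    omega
  · exact le_refl _


lemma pvInner_mono (a b : List Char) (alo blo i : Nat) :
    ∀ (l : List Nat) (best : Nat × Nat × Nat),
      best.2.2 ≤ (l.foldl (pvBStep a b alo blo i) best).2.2 := by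
  intro l
  induction l with
  | nil => intro best; exact le_refl _
  | cons x t ih =>
    intro best
    rw [List.foldl_cons]
    exact le_trans (pvBStep_mono a b alo blo i best x) (ih _)

lemma pvRows_mono (a b : List Char) (alo blo bhi : Nat) :
    ∀ (l : List Nat) (best : Nat × Nat × Nat),
      best.2.2 ≤ (l.foldl (fun best i2 => pvBRow a b alo blo bhi i2 best) best).2.2 := by
  intro l
  induction l with
  | nil => intro best; exact le_refl _
  | cons x t ih =>
    intro best
    rw [List.foldl_cons]
    refine le_trans ?_ (ih _)
    rw [pvBRow_def]
    exact pvInner_mono a b alo blo x _ best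

lemma pvBRow_size_ge (a b : List Char) (alo blo bhi i j : Nat) (hj1 : blo ≤ j) (hj2 : j < bhi)
    (best : Nat × Nat × Nat) :
    pvSuffixLen a b i j alo blo ≤ (pvBRow a b alo blo bhi i best).2.2 := by
  by_cases hch : a.getD i ' ' = b.getD j ' '
  · rw [pvBRow_def]
    have h1 : bhi - blo = (j - blo) + ((bhi - (j + 1)) + 1) := by omega
    rw [h1, ← List.range'_append_1]
    have h2 : blo + (j - blo) = j := by omega
    rw [h2, List.range'_succ, List.foldl_append, List.foldl_cons]
    refine le_trans ?_ (pvInner_mono a b alo blo i _ _)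
    set s1 := (List.range' blo (j - blo)).foldl (pvBStep a b alo blo i) best with hs1
    unfold pvBStep
    rw [if_neg (fun h => h hch)]
    split_ifs with h3
    · exact le_refl _
    · omega
  · rw [pvSuffixLen_eq_zero a b i j alo blo (fun hc => hch hc.2.2)]
    exact Nat.zero_le _

lemma pvLMB_size_ge (a b : List Char) (alo ahi blo bhi i j : Nat)
    (hi1 : alo ≤ i) (hi2 : i < ahi) (hj1 : blo ≤ j) (hj2 : j < bhi) :
    pvSuffixLen a b i j alo blo ≤ (pvLongestMatchB a b alo ahi blo bhi).2.2 := by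
  rw [pvLongestMatchB_eq_rows]
  have h1 : ahi - alo = (i - alo) + ((ahi - (i + 1)) + 1) := by omega
  rw [h1, ← List.range'_append_1]
  have h2 : alo + (i - alo) = i := by omega
  rw [h2, List.range'_succ, List.foldl_append, List.foldl_cons]
  refine le_trans ?_ (pvRows_mono a b alo blo bhi _ _)
  exact pvBRow_size_ge a b alo blo bhi i j hj1 hj2 _

lemma pvBStep_good (a b : List Char) (alo ahi blo bhi i : Nat) (hi1 : alo ≤ i) (hi2 : i < ahi) :
    ∀ (best : Nat × Nat × Nat) (j : Nat), blo ≤ j → j < bhi →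
      pvGoodB a b alo ahi blo bhi best → pvGoodB a b alo ahi blo bhi (pvBStep a b alo blo i best j) := by
  intro best j hj1 hj2 hg
  unfold pvBStep
  split_ifs with h1 h2
  · exact hg
  · exact Or.inr ⟨i, j, hi1, hi2, hj1, hj2, not_ne_iff.mp h1, rfl⟩
  · exact hg

lemma pvInner_good (a b : List Char) (alo ahi blo bhi i : Nat) (hi1 : alo ≤ i) (hi2 : i < ahi) :
    ∀ (l : List Nat), (∀ x ∈ l, blo ≤ x ∧ x < bhi) →
      ∀ (best : Nat × Nat × Nat), pvGoodB a b alo ahi blo bhi best →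
      pvGoodB a b alo ahi blo bhi (l.foldl (pvBStep a b alo blo i) best) := by
  intro l
  induction l with
  | nil => intro _ best hg; exact hg
  | cons x t ih =>
    intro hmem best hg
    rw [List.foldl_cons]
    exact ih (fun y hy => hmem y (List.mem_cons_of_mem x hy)) _
      (pvBStep_good a b alo ahi blo bhi i hi1 hi2 best x
        (hmem x List.mem_cons_self).1 (hmem x List.mem_cons_self).2 hg)

lemma pvLMB_good (a b : List Char) (alo ahi blo bhi : Nat) :
    pvGoodB a b alo ahi blo bhi (pvLongestMatchB a b alo ahi blo bhi) := by
  rw [pvLongestMatchB_eq_rows]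
  have : ∀ (l : List Nat), (∀ x ∈ l, alo ≤ x ∧ x < ahi) →
      ∀ (best : Nat × Nat × Nat), pvGoodB a b alo ahi blo bhi best →
      pvGoodB a b alo ahi blo bhi
        (l.foldl (fun best i2 => pvBRow a b alo blo bhi i2 best) best) := by
    intro l
    induction l with
    | nil => intro _ best hg; exact hg
    | cons x t ih =>
      intro hmem best hg
      rw [List.foldl_cons]
      refine ih (fun y hy => hmem y (List.mem_cons_of_mem x hy)) _ ?_
      rw [pvBRow_def]
      refine pvInner_good a b alo ahi blo bhi x (hmem x List.mem_cons_self).1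
        (hmem x List.mem_cons_self).2 _ ?_ best hg
      intro y hy
      rw [List.mem_range'] at hy
      obtain ⟨z, hz, rfl⟩ := hy
      omega
  refine this _ ?_ _ (Or.inl rfl)
  intro y hy
  rw [List.mem_range'] at hy
  obtain ⟨z, hz, rfl⟩ := hy
  omega

lemma pvExtendBack_noop (a b : List Char) (alo blo : Nat) (st : Nat × Nat × Nat)
    (h : ¬ (alo < st.1 ∧ blo < st.2.1 ∧ a.getD (st.1 - 1) ' ' = b.getD (st.2.1 - 1) ' ')) :
    ∀ fuel, pvExtendBack a b alo blo fuel st = st := by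
  intro fuel
  obtain ⟨bi, bj, sz⟩ := st
  cases fuel with
  | zero => rfl
  | succ n => simp only [pvExtendBack]; rw [if_neg h]

lemma pvExtendFwd_noop (a b : List Char) (ahi bhi : Nat) (st : Nat × Nat × Nat)
    (h : ¬ (st.1 + st.2.2 < ahi ∧ st.2.1 + st.2.2 < bhi ∧
      a.getD (st.1 + st.2.2) ' ' = b.getD (st.2.1 + st.2.2) ' ')) :
    ∀ fuel, pvExtendFwd a b ahi bhi fuel st = st := by
  intro fuel
  obtain ⟨bi, bj, sz⟩ := st
  cases fuel with
  | zero => rfl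
  | succ n => simp only [pvExtendFwd]; rw [if_neg h]

-- the two find_longest_match implementations agree on any window inside b
lemma pvFLM_eq (a b : List Char) (alo ahi blo bhi : Nat) (hb : bhi ≤ b.length)
    (hbb : blo ≤ bhi) :
    pvFindLongestMatch a b alo ahi blo bhi = pvLongestMatchB a b alo ahi blo bhi := by
  unfold pvFindLongestMatch
  have hcore := pvFlm_fold_eq a b alo blo bhi hb hbb (ahi - alo) alo (fun _ => 0)
    (alo, blo, 0) (le_refl alo) (Or.inl ⟨rfl, rfl⟩)
  rw [← pvLongestMatchB_eq_rows] at hcore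
  simp only [hcore]
  set m := pvLongestMatchB a b alo ahi blo bhi with hm
  have hgood := pvLMB_good a b alo ahi blo bhi
  rw [← hm] at hgood
  have hback : pvExtendBack a b alo blo m.1 m = m := by
    apply pvExtendBack_noop
    rcases hgood with hinit | ⟨i, j, hi1, hi2, hj1, hj2, hch, hrec⟩
    · rw [hinit]; intro hc; omega
    · rw [hrec]
      intro hc
      simp only [] at hc
      set s := pvSuffixLen a b i j alo blo with hs
      have h1 : alo + s ≤ i := by omega
      have h2 : blo + s ≤ j := by omega
      have e1 : i + 1 - s - 1 = i - s := by omega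
      have e2 : j + 1 - s - 1 = j - s := by omega
      rw [e1, e2] at hc
      exact pvSuffixLen_stop a b i j alo blo ⟨h1, h2, hc.2.2⟩
  rw [hback]
  apply pvExtendFwd_noop
  rcases hgood with hinit | ⟨i, j, hi1, hi2, hj1, hj2, hch, hrec⟩
  · rw [hinit]
    intro hc
    simp only [Nat.add_zero] at hc
    have h1 : 1 ≤ pvSuffixLen a b alo blo alo blo := by
      rw [pvSuffixLen_succ a b alo blo alo blo ⟨le_refl _, le_refl _, hc.2.2⟩]
      omega
    have h2 := pvLMB_size_ge a b alo ahi blo bhi alo blo (le_refl _) hc.1 (le_refl _) hc.2.1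
    rw [← hm, hinit] at h2
    simp only [] at h2
    omega
  · rw [hrec]
    intro hc
    simp only [] at hc
    set s := pvSuffixLen a b i j alo blo with hs
    have hbnd := pvSuffixLen_bound a b i j alo blo (by omega) (by omega)
    rw [← hs] at hbnd
    have e1 : i + 1 - s + s = i + 1 := by omega
    have e2 : j + 1 - s + s = j + 1 := by omega
    rw [e1, e2] at hc
    have hstep : pvSuffixLen a b (i + 1) (j + 1) alo blo = s + 1 := by
      rw [pvSuffixLen_succ a b (i + 1) (j + 1) alo blo ⟨by omega, by omega, hc.2.2⟩]
      rw [if_pos ⟨by omega, by omega⟩]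
      simp only [Nat.add_sub_cancel]
      rw [← hs]
    have h2 := pvLMB_size_ge a b alo ahi blo bhi (i + 1) (j + 1) (by omega) hc.1 (by omega) hc.2.1
    rw [← hm, hrec] at h2
    simp only [] at h2
    omega


-- ---- opcode filtering = prev-pointer scan over the blocks ----

def pvPrev (st : Nat × List (Int × Int)) (blocks : List (Nat × Nat × Nat)) :
    Nat × List (Int × Int) :=
  blocks.foldl
    (fun st bl => (bl.1 + bl.2.2, if bl.1 > st.1 then st.2 ++ [((st.1 : Int), (bl.1 : Int))] else st.2))
    st

-- one opcode step splits off the ops it appends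
lemma pvOpStep_split (i j : Nat) (ans : List (String × Nat × Nat × Nat × Nat)) (bl : Nat × Nat × Nat) :
    pvOpStep (i, j, ans) bl =
      (bl.1 + bl.2.2, bl.2.1 + bl.2.2, ans ++ (pvOpStep (i, j, []) bl).2.2) := by
  obtain ⟨ai, bj, sz⟩ := bl
  simp only [pvOpStep]
  split_ifs <;> simp

-- the opcode fold only appends to its answer list
lemma pvOpFold_append (blocks : List (Nat × Nat × Nat)) (i j : Nat)
    (ans : List (String × Nat × Nat × Nat × Nat)) :
    (List.foldl pvOpStep (i, j, ans) blocks).2.2 =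
      ans ++ (List.foldl pvOpStep (i, j, []) blocks).2.2 := by
  induction blocks generalizing i j ans with
  | nil => simp
  | cons bl rest ih =>
    rw [List.foldl_cons, List.foldl_cons, pvOpStep_split i j ans, pvOpStep_split i j []]
    rw [ih, ih _ _ ([] ++ _)]
    simp

lemma pvSpanFold_append (init : List (Int × Int)) (xs ys : List (String × Nat × Nat × Nat × Nat)) :
    pvSpanFold init (xs ++ ys) = pvSpanFold (pvSpanFold init xs) ys := by
  simp [pvSpanFold]

-- the spans contributed by one block's opcodes: exactly the a-gap (i, ai) when ai > i
lemma pvSpanFold_step (s : List (Int × Int)) (i j ai bj sz : Nat) :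
    pvSpanFold s (pvOpStep (i, j, []) (ai, bj, sz)).2.2 =
      if ai > i then s ++ [((i : Int), (ai : Int))] else s := by
  simp only [pvOpStep, pvSpanFold]
  split_ifs <;> simp_all

-- A's span extraction over the opcodes equals the prev-pointer scan of the blocks
lemma pv_main (blocks : List (Nat × Nat × Nat)) (i j : Nat) (s : List (Int × Int)) :
    pvSpanFold s (pvOpFold blocks (i, j, [])).2.2 = (pvPrev (i, s) blocks).2 := by
  induction blocks generalizing i j s with
  | nil => simp [pvOpFold, pvSpanFold, pvPrev]
  | cons bl rest ih =>
    obtain ⟨ai, bj, sz⟩ := bl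
    simp only [pvOpFold, pvPrev] at ih ⊢
    rw [List.foldl_cons, pvOpStep_split]
    simp only [List.nil_append]
    rw [pvOpFold_append, pvSpanFold_append, pvSpanFold_step, ih, List.foldl_cons]

-- ---- the merge pass does not change the prev-pointer scan ----

def pvMrg : Nat → Nat → Nat → List (Nat × Nat × Nat) → List (Nat × Nat × Nat)
  | i1, j1, k1, [] => if k1 ≠ 0 then [(i1, j1, k1)] else []
  | i1, j1, k1, bl :: rest =>
    if i1 + k1 = bl.1 ∧ j1 + k1 = bl.2.1 then pvMrg i1 j1 (k1 + bl.2.2) rest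
    else (if k1 ≠ 0 then [(i1, j1, k1)] else []) ++ pvMrg bl.1 bl.2.1 bl.2.2 rest

lemma pvMerge_fold_eq (raw : List (Nat × Nat × Nat)) :
    ∀ (i1 j1 k1 : Nat) (acc : List (Nat × Nat × Nat)),
      (let st := raw.foldl
        (fun (st : Nat × Nat × Nat × List (Nat × Nat × Nat)) bl =>
          if st.1 + st.2.2.1 = bl.1 ∧ st.2.1 + st.2.2.1 = bl.2.1 then
            (st.1, st.2.1, st.2.2.1 + bl.2.2, st.2.2.2)
          else
            (bl.1, bl.2.1, bl.2.2,
              if st.2.2.1 ≠ 0 then st.2.2.2 ++ [(st.1, st.2.1, st.2.2.1)] else st.2.2.2))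
        (i1, j1, k1, acc)
       (if st.2.2.1 ≠ 0 then st.2.2.2 ++ [(st.1, st.2.1, st.2.2.1)] else st.2.2.2)) =
      acc ++ pvMrg i1 j1 k1 raw := by
  induction raw with
  | nil =>
    intro i1 j1 k1 acc
    simp only [List.foldl_nil, pvMrg]
    split_ifs <;> simp
  | cons bl rest ih =>
    intro i1 j1 k1 acc
    simp only [List.foldl_cons, pvMrg]
    by_cases hadj : i1 + k1 = bl.1 ∧ j1 + k1 = bl.2.1
    · rw [if_pos hadj, if_pos hadj]
      exact ih i1 j1 (k1 + bl.2.2) acc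
    · rw [if_neg hadj, if_neg hadj]
      rw [ih bl.1 bl.2.1 bl.2.2 _]
      split_ifs <;> simp


lemma pvMrg_prev (S : List (Nat × Nat × Nat)) :
    ∀ (L : List (Nat × Nat × Nat)), (∀ bl ∈ L, bl.2.2 ≠ 0) →
      ∀ (i1 j1 k1 p : Nat) (s : List (Int × Int)), (k1 = 0 → i1 = p) →
        pvPrev (p, s) (pvMrg i1 j1 k1 L ++ S) = pvPrev (p, s) ((i1, j1, k1) :: (L ++ S)) := by
  intro L
  induction L with
  | nil =>
    intro _ i1 j1 k1 p s hk
    simp only [pvMrg, List.nil_append]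
    by_cases hk1 : k1 = 0
    · rw [if_neg (by omega)]
      subst hk1
      have hip := hk rfl
      subst hip
      simp only [pvPrev, List.foldl_cons, List.nil_append, Nat.add_zero]
      rw [if_neg (by omega)]
    · rw [if_pos hk1]
      rfl
  | cons bl rest ih =>
    intro hnz i1 j1 k1 p s hk
    have hblnz : bl.2.2 ≠ 0 := hnz bl List.mem_cons_self
    have hrest : ∀ x ∈ rest, x.2.2 ≠ 0 := fun x hx => hnz x (List.mem_cons_of_mem bl hx)
    simp only [pvMrg]
    by_cases hadj : i1 + k1 = bl.1 ∧ j1 + k1 = bl.2.1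
    · obtain ⟨ha1, ha2⟩ := hadj
      rw [if_pos ⟨ha1, ha2⟩]
      rw [ih hrest i1 j1 (k1 + bl.2.2) p s (by intro h0; exact absurd (by omega : bl.2.2 = 0) hblnz)]
      simp only [pvPrev, List.cons_append, List.foldl_cons]
      rw [if_neg (by omega : ¬ bl.1 > i1 + k1)]
      have e1 : bl.1 + bl.2.2 = i1 + (k1 + bl.2.2) := by omega
      rw [e1]
    · rw [if_neg hadj]
      by_cases hk1 : k1 = 0
      · rw [if_neg (by omega)]
        subst hk1
        have hip := hk rfl
        subst hip
        simp only [List.nil_append]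
        rw [ih hrest bl.1 bl.2.1 bl.2.2 i1 s (fun h0 => absurd h0 hblnz)]
        simp only [pvPrev, List.cons_append, List.foldl_cons, Nat.add_zero]
        rw [if_neg (by omega : ¬ i1 > i1)]
      · rw [if_pos hk1]
        have hstep : pvPrev (p, s) (((i1, j1, k1) :: pvMrg bl.1 bl.2.1 bl.2.2 rest) ++ S) =
            pvPrev (i1 + k1, if i1 > p then s ++ [((p : Int), (i1 : Int))] else s)
              (pvMrg bl.1 bl.2.1 bl.2.2 rest ++ S) := by
          simp only [pvPrev, List.cons_append, List.foldl_cons]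
        rw [List.singleton_append, hstep, ih hrest bl.1 bl.2.1 bl.2.2 (i1 + k1) _ (fun h0 => absurd h0 hblnz)]
        simp only [pvPrev, List.cons_append, List.foldl_cons]

lemma pvMBlocks_nonzero (a b : List Char) :
    ∀ (fuel alo ahi blo bhi : Nat) (bl : Nat × Nat × Nat),
      bl ∈ pvMBlocks a b fuel alo ahi blo bhi → bl.2.2 ≠ 0 := by
  intro fuel
  induction fuel with
  | zero => intro alo ahi blo bhi bl h; simp [pvMBlocks] at h
  | succ n ih =>
    intro alo ahi blo bhi bl h
    simp only [pvMBlocks] at h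
    split_ifs at h with h0
    · simp at h
    · rw [List.mem_append, List.mem_cons] at h
      rcases h with h | h | h
      · exact ih _ _ _ _ bl h
      · rw [h]; exact h0
      · exact ih _ _ _ _ bl h

-- the recorded block lies inside the window
lemma pvLMB_window (a b : List Char) (alo ahi blo bhi : Nat)
    (h : (pvLongestMatchB a b alo ahi blo bhi).2.2 ≠ 0) :
    alo ≤ (pvLongestMatchB a b alo ahi blo bhi).1 ∧
    (pvLongestMatchB a b alo ahi blo bhi).1 + (pvLongestMatchB a b alo ahi blo bhi).2.2 ≤ ahi ∧
    blo ≤ (pvLongestMatchB a b alo ahi blo bhi).2.1 ∧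
    (pvLongestMatchB a b alo ahi blo bhi).2.1 + (pvLongestMatchB a b alo ahi blo bhi).2.2 ≤ bhi := by
  rcases pvLMB_good a b alo ahi blo bhi with hinit | ⟨i, j, hi1, hi2, hj1, hj2, hch, hrec⟩
  · rw [hinit] at h ⊢
    simp at h
  · rw [hrec] at h ⊢
    have hbnd := pvSuffixLen_bound a b i j alo blo (by omega) (by omega)
    simp only []
    omega

-- main correspondence: the prev-pointer scan of A's raw blocks yields B's gaps
-- (the pending tail span (prev, ahi) is flushed by the caller / the sentinel)
lemma pvG1 (a b : List Char) :
    ∀ (fuel alo ahi blo bhi : Nat), alo ≤ ahi → ahi - alo < fuel → blo ≤ bhi →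
      bhi ≤ b.length → ∀ (s : List (Int × Int)),
        (pvPrev (alo, s) (pvMBlocks a b fuel alo ahi blo bhi)).1 ≤ ahi ∧
        pvGapsB a b fuel alo ahi blo bhi s =
          (pvPrev (alo, s) (pvMBlocks a b fuel alo ahi blo bhi)).2 ++
            (if (pvPrev (alo, s) (pvMBlocks a b fuel alo ahi blo bhi)).1 < ahi then
              [(((pvPrev (alo, s) (pvMBlocks a b fuel alo ahi blo bhi)).1 : Int), (ahi : Int))]
            else []) := by
  intro fuel
  induction fuel with
  | zero => intro alo ahi blo bhi h1 h2; omega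
  | succ n ih =>
    intro alo ahi blo bhi h1 h2 h3 h4 s
    simp only [pvMBlocks, pvGapsB, pvFLM_eq a b alo ahi blo bhi h4 h3]
    set m := pvLongestMatchB a b alo ahi blo bhi with hm
    by_cases h0 : m.2.2 = 0
    · rw [if_pos h0, if_pos h0]
      simp only [pvPrev, List.foldl_nil]
      refine ⟨h1, ?_⟩
      by_cases h5 : alo < ahi
      · rw [if_pos h5, if_pos h5]
      · rw [if_neg h5, if_neg h5, List.append_nil]
    · rw [if_neg h0, if_neg h0]
      obtain ⟨hw1, hw2, hw3, hw4⟩ := pvLMB_window a b alo ahi blo bhi h0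
      rw [← hm] at hw1 hw2 hw3 hw4
      have hleft := ih alo m.1 blo m.2.1 (by omega) (by omega) (by omega) (by omega) s
      have hstep : pvPrev (alo, s) (pvMBlocks a b n alo m.1 blo m.2.1 ++ m :: pvMBlocks a b n (m.1 + m.2.2) ahi (m.2.1 + m.2.2) bhi) =
          pvPrev (m.1 + m.2.2, pvGapsB a b n alo m.1 blo m.2.1 s)
            (pvMBlocks a b n (m.1 + m.2.2) ahi (m.2.1 + m.2.2) bhi) := by
        unfold pvPrev
        rw [List.foldl_append, List.foldl_cons]
        congr 1
        set r1 := List.foldl _ (alo, s) (pvMBlocks a b n alo m.1 blo m.2.1) with hr1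
        have hr1e : r1 = pvPrev (alo, s) (pvMBlocks a b n alo m.1 blo m.2.1) := rfl
        obtain ⟨e1, e2⟩ := hleft
        rw [← hr1e] at e1 e2
        rw [e2]
        by_cases h6 : m.1 > r1.1
        · rw [if_pos h6, if_pos (by omega)]
        · rw [if_neg h6, if_neg (by omega), List.append_nil]
      rw [hstep]
      exact ih (m.1 + m.2.2) ahi (m.2.1 + m.2.2) bhi (by omega) (by omega) (by omega) (by omega)
        (pvGapsB a b n alo m.1 blo m.2.1 s)

-- ===== VERDICT (by name: the statement is the Claim_ definition above) =====
theorem compute_deleted_spans_spec : Claim_equal_compute_deleted_spans := by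
  intro original masked _
  unfold Spec_compute_deleted_spans compute_deleted_spans compute_deleted_spans_alt
  simp only []
  set A := original.toList with hA
  set B := (PySem.Str.replace masked "[REDACTED]" "").toList with hB
  rw [pv_main (pvGetMatchingBlocks A B) 0 0 []]
  have hmerge := pvMerge_fold_eq (pvMBlocks A B (A.length + 1) 0 A.length 0 B.length) 0 0 0 []
  simp only [List.nil_append] at hmerge
  have hgmb : pvGetMatchingBlocks A B =
      pvMrg 0 0 0 (pvMBlocks A B (A.length + 1) 0 A.length 0 B.length) ++
        [(A.length, B.length, 0)] := by
    unfold pvGetMatchingBlocks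
    rw [← hmerge]
  rw [hgmb, pvMrg_prev [(A.length, B.length, 0)] _
    (fun bl hbl => pvMBlocks_nonzero A B _ _ _ _ _ bl hbl) 0 0 0 0 [] (fun _ => rfl)]
  have hstrip : pvPrev (0, ([] : List (Int × Int)))
      ((0, 0, 0) :: (pvMBlocks A B (A.length + 1) 0 A.length 0 B.length ++
        [(A.length, B.length, 0)])) =
      pvPrev (0, []) (pvMBlocks A B (A.length + 1) 0 A.length 0 B.length ++
        [(A.length, B.length, 0)]) := by
    simp only [pvPrev, List.foldl_cons, Nat.add_zero]
    rw [if_neg (by omega : ¬ (0 : Nat) > 0)]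
  rw [hstrip]
  have hG := pvG1 A B (A.length + 1) 0 A.length 0 B.length (by omega) (by omega) (by omega)
    (le_refl _) []
  rw [hG.2]
  have hsplit : pvPrev (0, ([] : List (Int × Int)))
      (pvMBlocks A B (A.length + 1) 0 A.length 0 B.length ++ [(A.length, B.length, 0)]) =
      pvPrev (pvPrev (0, []) (pvMBlocks A B (A.length + 1) 0 A.length 0 B.length))
        [(A.length, B.length, 0)] := by
    unfold pvPrev
    rw [List.foldl_append]
  rw [hsplit]
  set r := pvPrev (0, ([] : List (Int × Int)))
    (pvMBlocks A B (A.length + 1) 0 A.length 0 B.length) with hr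
  have hrpair : r = (r.1, r.2) := rfl
  rw [hrpair]
  simp only [pvPrev, List.foldl_cons, List.foldl_nil, Nat.add_zero]
  by_cases h6 : A.length > r.1
  · rw [if_pos h6, if_pos (by omega)]
  · rw [if_neg h6, if_neg (by omega), List.append_nil]
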